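-- pv_equiv track=rewrite | github.com/ORazB/LeetCode | Arrays & Hash Map/3889. Mirror Frequency Distance/code.py | mirrorFrequency
-- ===== SOURCE A (Python) =====
-- def mirrorFrequency(s: str) -> int:
--
--     freqC = {}
--     res = 0
--
--     # Build frequencies
--     for char in s:
--         freqC[char] = freqC.get(char, 0) + 1
--
--     # For marking already visited pair
--     marked = {}
--
--     # Loop only unique char
--     for char in freqC.keys():
--         # Handle mirror for number & character
--         if char.isnumeric():
--             mirror = chr(ord('0') + ord('9') - ord(char))
--         else:
--             mirror = chr(ord('a') + ord('z') - ord(char))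
--
--         # If marked skip
--         if char in marked or mirror in marked:
--             continue
--
--         # If mirror is not in freqC then substract by 0
--         if mirror not in freqC:
--             res += abs(freqC[char] - 0)
--         else:
--             res += abs(freqC[char] - freqC[mirror])
--
--         # Mark the pair
--         marked[char] = mirror
--         marked[mirror] = char
--     return res
-- ===== SOURCE B (Python) =====
-- def mirrorFrequency(s: str) -> int:
--     # One pass: keep a SIGNED balance per canonical pair representative
--     # (min of the pair); answer is the sum of absolute balances.
--     bal = {}
--     for c in s:
--         if c.isnumeric():
--             m = chr(ord('0') + ord('9') - ord(c))
--         else: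
--             m = chr(ord('a') + ord('z') - ord(c))
--         r = min(c, m)
--         bal[r] = bal.get(r, 0) + (1 if c == r else -1)
--     return sum(abs(v) for v in bal.values())
-- ===== Notes on version B (the rewrite author's own statement) =====
-- stated objective: alternative
-- what changed: Replaces A's two-stage frequency-map-then-deduplicated-pair-scan (with a 'marked' visited dict) by a single pass over the string maintaining one signed balance per canonical pair representative (+1 for the smaller member of the pair, -1 for the larger), returning the sum of absolute balances.
import Mathlib
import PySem

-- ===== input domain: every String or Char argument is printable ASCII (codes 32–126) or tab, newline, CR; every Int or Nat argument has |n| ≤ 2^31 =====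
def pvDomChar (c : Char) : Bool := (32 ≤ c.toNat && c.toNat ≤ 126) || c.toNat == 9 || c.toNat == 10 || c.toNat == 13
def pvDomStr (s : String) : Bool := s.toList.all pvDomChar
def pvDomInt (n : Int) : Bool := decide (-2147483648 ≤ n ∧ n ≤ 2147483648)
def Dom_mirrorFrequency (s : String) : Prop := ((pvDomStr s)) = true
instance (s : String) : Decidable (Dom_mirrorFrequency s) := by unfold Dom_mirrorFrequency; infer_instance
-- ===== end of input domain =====

-- B replaces A's frequency-map-plus-marked-pair scan by a single pass keeping one
-- signed balance per canonical pair representative; same O(n) cost (objective: alternative).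


-- ===== PORT A =====
-- mirror computation shared verbatim by both Pythons; `PySem.Chars.isdigit` is exact for
-- Python's str.isnumeric on the ASCII domain, `Char.ofNat` is exact for chr on in-range codes.
def pvMirror (c : Char) : Char :=
  if PySem.Chars.isdigit c then Char.ofNat (48 + 57 - c.toNat)
  else Char.ofNat (97 + 122 - c.toNat)

def mirrorFrequency (s : String) : Int :=
  let freqC := s.toList.foldl (fun d ch => d.insert ch (d.getD ch 0 + 1)) PySem.Dict.empty
  let st := freqC.keys.foldl
    (fun (st : Int × PySem.Dict Char Char) ch =>
      let mirror := pvMirror ch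
      if st.2.contains ch || st.2.contains mirror then st
      else
        let res :=
          if freqC.contains mirror = false then st.1 + |freqC.getD ch 0 - 0|
          else st.1 + |freqC.getD ch 0 - freqC.getD mirror 0|
        (res, (st.2.insert ch mirror).insert mirror ch))
    (0, PySem.Dict.empty)
  st.1

-- ===== PORT B =====
def mirrorFrequency_alt (s : String) : Int :=
  let bal := s.toList.foldl
    (fun d c =>
      let r := min c (pvMirror c)
      d.insert r (d.getD r 0 + (if c == r then 1 else -1)))
    PySem.Dict.empty
  (bal.values.map (fun v => |v|)).sum

-- ===== PRECONDITION & SPEC =====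
def Spec_mirrorFrequency (s : String) (out : Int) : Prop := out = mirrorFrequency_alt s
instance (s : String) (out : Int) : Decidable (Spec_mirrorFrequency s out) := by unfold Spec_mirrorFrequency; infer_instance

-- ===== CLAIM (what is proved, stated in full; the proofs are below) =====
def Claim_equal_mirrorFrequency : Prop := ∀ (s : String), Dom_mirrorFrequency s → Spec_mirrorFrequency s (mirrorFrequency s)

-- ===== LEMMAS AND PROOFS =====

-- canonical representative of the pair {c, mirror c}, its sign, and the pair payout
def pvRep (c : Char) : Char := min c (pvMirror c)
def pvSgn (c : Char) : Int := if c == pvRep c then 1 else -1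
def pvH (l : List Char) (c : Char) : Int := |(l.count c : Int) - (l.count (pvMirror c) : Int)|

-- A's pair-selection, abstracted: S = chars already selected
def pvSelAccum (K S : List Char) : List Char :=
  match K with
  | [] => []
  | c :: K' =>
    if c ∈ S ∨ pvMirror c ∈ S then pvSelAccum K' S
    else c :: pvSelAccum K' (S ++ [c])

-- character-level facts, verified by computation over the 127 relevant codes
lemma pvChar_facts : ∀ n : Nat, n < 127 → pvDomChar (Char.ofNat n) = true →
    pvMirror (pvMirror (Char.ofNat n)) = Char.ofNat n ∧
    pvMirror (Char.ofNat n) ≠ Char.ofNat n ∧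
    pvDomChar (pvRep (Char.ofNat n)) = true ∧
    pvRep (pvRep (Char.ofNat n)) = pvRep (Char.ofNat n) := by decide

lemma pvLt127 {c : Char} (h : pvDomChar c = true) : c.toNat < 127 := by
  simp [pvDomChar] at h
  omega

lemma pvFacts {c : Char} (h : pvDomChar c = true) :
    pvMirror (pvMirror c) = c ∧ pvMirror c ≠ c ∧
    pvDomChar (pvRep c) = true ∧ pvRep (pvRep c) = pvRep c := by
  have := pvChar_facts c.toNat (pvLt127 h)
  rw [Char.ofNat_toNat] at this
  exact this h

lemma pvMirror_invol {c : Char} (h : pvDomChar c = true) : pvMirror (pvMirror c) = c :=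
  (pvFacts h).1

lemma pvMirror_ne {c : Char} (h : pvDomChar c = true) : pvMirror c ≠ c :=
  (pvFacts h).2.1

lemma pvRep_dom {c : Char} (h : pvDomChar c = true) : pvDomChar (pvRep c) = true :=
  (pvFacts h).2.2.1

lemma pvRep_idem {c : Char} (h : pvDomChar c = true) : pvRep (pvRep c) = pvRep c :=
  (pvFacts h).2.2.2

lemma pvMirror_eq_iff {a b : Char} (ha : pvDomChar a = true) (hb : pvDomChar b = true) :
    pvMirror a = b ↔ a = pvMirror b := by
  constructor
  · rintro rfl; exact (pvMirror_invol ha).symm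
  · rintro rfl; exact pvMirror_invol hb

lemma pvRep_mirror {c : Char} (h : pvDomChar c = true) : pvRep (pvMirror c) = pvRep c := by
  unfold pvRep
  rw [pvMirror_invol h, min_comm]

lemma pvRep_choice (c : Char) : pvRep c = c ∨ pvRep c = pvMirror c := min_choice c (pvMirror c)

-- ===== B side =====

-- the balance dict's lookup is a signed sum over the string
lemma pvBal_getD (l : List Char) (d : PySem.Dict Char Int) (r : Char) :
    (l.foldl (fun d c =>
        d.insert (pvRep c) (d.getD (pvRep c) 0 + (if c == pvRep c then 1 else -1))) d).getD r 0
      = d.getD r 0 + (l.map (fun c => if pvRep c == r then pvSgn c else 0)).sum := by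
  induction l generalizing d with
  | nil => simp
  | cons c t ih =>
    simp only [List.foldl_cons, List.map_cons, List.sum_cons, ih]
    rw [PySem.Dict.getD_insert]
    unfold pvSgn
    by_cases hc : r = pvRep c
    · simp [hc, add_assoc]
    · simp [hc, show ¬(pvRep c = r) from fun h' => hc h'.symm]

-- pointwise: the signed contribution of a char to representative r
lemma pvPoint {r c : Char} (hr : pvDomChar r = true) (hrr : pvRep r = r)
    (hc : pvDomChar c = true) :
    (if pvRep c == r then pvSgn c else 0)
      = (if c == r then (1 : Int) else 0) - (if c == pvMirror r then 1 else 0) := by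
  by_cases h1 : c = r
  · subst h1
    simp [hrr, pvSgn, Ne.symm (pvMirror_ne hr)]
  · by_cases h2 : c = pvMirror r
    · subst h2
      simp [pvRep_mirror hr, hrr, pvSgn, h1]
    · have hrep : pvRep c ≠ r := by
        rcases pvRep_choice c with hx | hx <;> rw [hx]
        · exact h1
        · intro he
          exact h2 ((pvMirror_eq_iff hc hr).mp he)
      simp [hrep, h1, h2]

-- signed sum = count difference
lemma pvSignedSum (l : List Char) (r : Char) (hl : ∀ c ∈ l, pvDomChar c = true)
    (hr : pvDomChar r = true) (hrr : pvRep r = r) :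
    (l.map (fun c => if pvRep c == r then pvSgn c else 0)).sum
      = (l.count r : Int) - (l.count (pvMirror r) : Int) := by
  induction l with
  | nil => simp
  | cons c t ih =>
    have hc := hl c (by simp)
    simp only [List.map_cons, List.sum_cons, List.count_cons,
      ih (fun x hx => hl x (List.mem_cons_of_mem _ hx))]
    rw [pvPoint hr hrr hc]
    push_cast
    ring

-- B computes the sum of payouts over the distinct representatives
lemma pvB_eq (s : String) (hl : ∀ c ∈ s.toList, pvDomChar c = true) :
    mirrorFrequency_alt s
      = ((PySem.Set.ofList (s.toList.map pvRep)).map (pvH s.toList)).sum := by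
  have hbal : mirrorFrequency_alt s =
      (((s.toList.foldl (fun d c =>
          d.insert (pvRep c) (d.getD (pvRep c) 0 + (if c == pvRep c then 1 else -1)))
        PySem.Dict.empty).values).map (fun v => |v|)).sum := rfl
  rw [hbal]
  set l := s.toList with hls
  set bal := l.foldl (fun d c =>
      d.insert (pvRep c) (d.getD (pvRep c) 0 + (if c == pvRep c then 1 else -1)))
    PySem.Dict.empty with hbaldef
  have hnd : bal.keys.Nodup := by
    rw [hbaldef]
    exact PySem.Dict.nodup_keys_foldl_insert_key l pvRep _ _ PySem.Dict.nodup_keys_empty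
  have hkeys : bal.keys = PySem.Set.ofList (l.map pvRep) := by
    rw [hbaldef, PySem.Dict.keys_foldl_insert_key]
    simp [PySem.Set.ofList_eq_foldl, PySem.Set.update]
  rw [PySem.Dict.values_eq_map_keys bal hnd 0, List.map_map, hkeys]
  refine congrArg List.sum (List.map_congr_left ?_)
  intro r hr
  have hmem : r ∈ l.map pvRep := (PySem.Set.mem_ofList _ _).mp hr
  obtain ⟨c, hcl, hcr⟩ := List.mem_map.mp hmem
  have hcD : pvDomChar c = true := hl c hcl
  have hrD : pvDomChar r = true := hcr ▸ pvRep_dom hcD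
  have hrr : pvRep r = r := hcr ▸ pvRep_idem hcD
  have := pvBal_getD l PySem.Dict.empty r
  rw [← hbaldef] at this
  simp only [Function.comp_apply, this, PySem.Dict.getD_empty, zero_add,
    pvSignedSum l r hl hrD hrr]
  rfl

-- ===== A side =====

-- injectivity of the mirror on the domain
lemma pvMirror_inj {a b : Char} (ha : pvDomChar a = true) (hb : pvDomChar b = true)
    (h : pvMirror a = pvMirror b) : a = b := by
  have := congrArg pvMirror h
  rwa [pvMirror_invol ha, pvMirror_invol hb] at this

-- A's loop body, with the frequency dict already identified as Counter(l)
def pvStepA (l : List Char) (st : Int × PySem.Dict Char Char) (ch : Char) :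
    Int × PySem.Dict Char Char :=
  let mirror := pvMirror ch
  if st.2.contains ch || st.2.contains mirror then st
  else
    let res :=
      if (PySem.Dict.counter l).contains mirror = false then
        st.1 + |(PySem.Dict.counter l).getD ch 0 - 0|
      else st.1 + |(PySem.Dict.counter l).getD ch 0 - (PySem.Dict.counter l).getD mirror 0|
    (res, (st.2.insert ch mirror).insert mirror ch)

-- the value A's step adds is the pair payout
lemma pvStep_val (l : List Char) (c : Char) (r0 : Int) :
    (if (PySem.Dict.counter l).contains (pvMirror c) = false then
        r0 + |(PySem.Dict.counter l).getD c 0 - 0|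
      else r0 + |(PySem.Dict.counter l).getD c 0 - (PySem.Dict.counter l).getD (pvMirror c) 0|)
      = r0 + pvH l c := by
  by_cases h : (PySem.Dict.counter l).contains (pvMirror c) = false
  · have h0 : (PySem.Dict.counter l).getD (pvMirror c) 0 = 0 :=
      PySem.Dict.getD_of_not_contains _ 0 h
    have hcnt : ((l.count (pvMirror c) : Int)) = 0 := by
      simpa [PySem.Dict.getD_counter] using h0
    simp [h, pvH, PySem.Dict.getD_counter, hcnt]
  · simp [h, pvH, PySem.Dict.getD_counter]

-- invariant of A's key loop
lemma pvA_loop (l K S : List Char) (res : Int) (marked : PySem.Dict Char Char)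
    (hK : ∀ c ∈ K, pvDomChar c = true) (hS : ∀ c ∈ S, pvDomChar c = true)
    (hM : ∀ x, marked.contains x = true ↔ x ∈ S ∨ x ∈ S.map pvMirror) :
    (K.foldl (pvStepA l) (res, marked)).1
      = res + ((pvSelAccum K S).map (pvH l)).sum := by
  induction K generalizing S res marked with
  | nil => simp [pvSelAccum]
  | cons c K' ih =>
    have hcD : pvDomChar c = true := hK c List.mem_cons_self
    have hKt : ∀ x ∈ K', pvDomChar x = true := fun x hx => hK x (List.mem_cons_of_mem _ hx)
    have hcond : (marked.contains c || marked.contains (pvMirror c)) = true ↔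
        (c ∈ S ∨ pvMirror c ∈ S) := by
      rw [Bool.or_eq_true, hM c, hM (pvMirror c)]
      constructor
      · rintro ((h | h) | (h | h))
        · exact Or.inl h
        · obtain ⟨d, hd, hdc⟩ := List.mem_map.mp h
          exact Or.inr ((pvMirror_eq_iff (hS d hd) hcD).mp hdc ▸ hd)
        · exact Or.inr h
        · obtain ⟨d, hd, hdc⟩ := List.mem_map.mp h
          exact Or.inl (pvMirror_inj (hS d hd) hcD hdc ▸ hd)
      · rintro (h | h)
        · exact Or.inl (Or.inl h)
        · exact Or.inr (Or.inl h)
    rw [List.foldl_cons]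
    by_cases hsel : c ∈ S ∨ pvMirror c ∈ S
    · have hb : (marked.contains c || marked.contains (pvMirror c)) = true := hcond.mpr hsel
      have hstep : pvStepA l (res, marked) c = (res, marked) := by
        unfold pvStepA
        simp only []
        rw [if_pos hb]
      rw [hstep]
      unfold pvSelAccum
      rw [if_pos hsel]
      exact ih S res marked hKt hS hM
    · have hb : ¬ ((marked.contains c || marked.contains (pvMirror c)) = true) :=
        fun h => hsel (hcond.mp h)
      have hstep : pvStepA l (res, marked) c =
          (res + pvH l c, (marked.insert c (pvMirror c)).insert (pvMirror c) c) := by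
        unfold pvStepA
        simp only []
        rw [if_neg hb, pvStep_val]
      rw [hstep]
      unfold pvSelAccum
      rw [if_neg hsel]
      have hS' : ∀ x ∈ S ++ [c], pvDomChar x = true := by
        intro x hx
        rcases List.mem_append.mp hx with hx | hx
        · exact hS x hx
        · rw [List.mem_singleton.mp hx]; exact hcD
      have hM' : ∀ x, ((marked.insert c (pvMirror c)).insert (pvMirror c) c).contains x = true ↔
          x ∈ S ++ [c] ∨ x ∈ (S ++ [c]).map pvMirror := by
        intro x
        rw [PySem.Dict.contains_insert, PySem.Dict.contains_insert,
          Bool.or_eq_true, Bool.or_eq_true, beq_iff_eq, beq_iff_eq, hM x]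
        simp only [List.mem_append, List.map_append, List.map_cons, List.map_nil,
          List.mem_singleton]
        tauto
      rw [ih (S ++ [c]) (res + pvH l c) _ hKt hS' hM']
      simp [add_assoc]

-- properties of the selection list (S = [] case is A's actual run)
lemma pvSel_sub (K S : List Char) : ∀ c ∈ pvSelAccum K S, c ∈ K := by
  induction K generalizing S with
  | nil => simp [pvSelAccum]
  | cons c K' ih =>
    intro x hx
    unfold pvSelAccum at hx
    split at hx
    · exact List.mem_cons_of_mem _ (ih S x hx)
    · rcases List.mem_cons.mp hx with rfl | hx'
      · exact List.mem_cons_self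
      · exact List.mem_cons_of_mem _ (ih _ x hx')

lemma pvSel_inv (K S : List Char) (hK : ∀ c ∈ K, pvDomChar c = true)
    (hS : ∀ c ∈ S, pvDomChar c = true)
    (hnd : S.Nodup) (hmf : ∀ a ∈ S, ∀ b ∈ S, pvMirror a ≠ b) :
    (S ++ pvSelAccum K S).Nodup ∧
    (∀ a ∈ S ++ pvSelAccum K S, ∀ b ∈ S ++ pvSelAccum K S, pvMirror a ≠ b) := by
  induction K generalizing S with
  | nil => simpa [pvSelAccum] using ⟨hnd, hmf⟩
  | cons c K' ih =>
    have hcD : pvDomChar c = true := hK c List.mem_cons_self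
    have hKt : ∀ x ∈ K', pvDomChar x = true := fun x hx => hK x (List.mem_cons_of_mem _ hx)
    unfold pvSelAccum
    split
    · exact ih S hKt hS hnd hmf
    · rename_i hsel
      have hc1 : c ∉ S := fun h => hsel (Or.inl h)
      have hc2 : pvMirror c ∉ S := fun h => hsel (Or.inr h)
      have hS' : ∀ x ∈ S ++ [c], pvDomChar x = true := by
        intro x hx
        rcases List.mem_append.mp hx with hx | hx
        · exact hS x hx
        · rw [List.mem_singleton.mp hx]; exact hcD
      have hnd' : (S ++ [c]).Nodup := by
        simp [List.nodup_append, hnd]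
        exact fun a ha ha' => hc1 (ha' ▸ ha)
      have hmf' : ∀ a ∈ S ++ [c], ∀ b ∈ S ++ [c], pvMirror a ≠ b := by
        intro a ha b hb
        rcases List.mem_append.mp ha with ha | ha <;> rcases List.mem_append.mp hb with hb | hb
        · exact hmf a ha b hb
        · rw [List.mem_singleton.mp hb]
          intro he
          exact hc2 ((pvMirror_eq_iff (hS a ha) hcD).mp he ▸ ha)
        · rw [List.mem_singleton.mp ha]
          intro he
          exact hc2 (by rw [he]; exact hb)
        · rw [List.mem_singleton.mp ha, List.mem_singleton.mp hb]
          exact pvMirror_ne hcD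
      have hmain := ih (S ++ [c]) hKt hS' hnd' hmf'
      rw [List.append_cons]
      exact hmain

lemma pvSel_cover (K S : List Char) :
    ∀ c ∈ K, (c ∈ S ∨ pvMirror c ∈ S) ∨ (c ∈ pvSelAccum K S ∨ pvMirror c ∈ pvSelAccum K S) := by
  induction K generalizing S with
  | nil => simp
  | cons c K' ih =>
    intro x hx
    unfold pvSelAccum
    split
    · rename_i hsel
      rcases List.mem_cons.mp hx with hxc | hx'
      · exact Or.inl (hxc ▸ hsel)
      · exact ih S x hx'
    · rcases List.mem_cons.mp hx with hxc | hx'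
      · exact Or.inr (Or.inl (by rw [hxc]; exact List.mem_cons_self))
      · rcases ih (S ++ [c]) x hx' with (h | h) | (h | h)
        · rcases List.mem_append.mp h with h | h
          · exact Or.inl (Or.inl h)
          · exact Or.inr (Or.inl (by rw [List.mem_singleton.mp h]; exact List.mem_cons_self))
        · rcases List.mem_append.mp h with h | h
          · exact Or.inl (Or.inr h)
          · exact Or.inr (Or.inr (by rw [List.mem_singleton.mp h]; exact List.mem_cons_self))
        · exact Or.inr (Or.inl (List.mem_cons_of_mem _ h))
        · exact Or.inr (Or.inr (List.mem_cons_of_mem _ h))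

-- ===== assembly =====

lemma pvH_mirror (l : List Char) {c : Char} (h : pvDomChar c = true) :
    pvH l (pvMirror c) = pvH l c := by
  unfold pvH
  rw [pvMirror_invol h, abs_sub_comm]

lemma pvH_rep (l : List Char) {c : Char} (h : pvDomChar c = true) :
    pvH l (pvRep c) = pvH l c := by
  rcases pvRep_choice c with hc | hc <;> rw [hc]
  exact pvH_mirror l h

lemma pvMain (l : List Char) (hl : ∀ c ∈ l, pvDomChar c = true) :
    ((pvSelAccum (PySem.Set.ofList l) []).map (pvH l)).sum
      = ((PySem.Set.ofList (l.map pvRep)).map (pvH l)).sum := by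
  set K := PySem.Set.ofList l with hKdef
  have hK : ∀ c ∈ K, pvDomChar c = true :=
    fun c hc => hl c ((PySem.Set.mem_ofList _ _).mp hc)
  set Sel := pvSelAccum K [] with hSeldef
  have hSelK : ∀ c ∈ Sel, c ∈ K := pvSel_sub K []
  have hSelD : ∀ c ∈ Sel, pvDomChar c = true := fun c hc => hK c (hSelK c hc)
  have hinv := pvSel_inv K [] hK (by simp) (by simp) (by simp)
  simp only [List.nil_append] at hinv
  obtain ⟨hndSel, hmf⟩ := hinv
  have hinj : ∀ a ∈ Sel, ∀ b ∈ Sel, pvRep a = pvRep b → a = b := by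
    intro a ha b hb hab
    have haD := hSelD a ha
    have hbD := hSelD b hb
    rcases pvRep_choice a with h1 | h1 <;> rcases pvRep_choice b with h2 | h2 <;>
      rw [h1] at hab <;> rw [h2] at hab
    · exact hab
    · exact absurd hab.symm (hmf b hb a ha)
    · exact absurd hab (hmf a ha b hb)
    · exact pvMirror_inj haD hbD hab
  have hndmap : (Sel.map pvRep).Nodup :=
    List.Nodup.map_on (fun x hx y hy h => hinj x hx y hy h) hndSel
  have hperm : (PySem.Set.ofList (l.map pvRep)).Perm (Sel.map pvRep) := by
    refine (List.perm_ext_iff_of_nodup (PySem.Set.nodup_ofList _) hndmap).mpr ?_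
    intro x
    rw [PySem.Set.mem_ofList]
    constructor
    · intro hx
      obtain ⟨c, hcl, rfl⟩ := List.mem_map.mp hx
      have hcK : c ∈ K := (PySem.Set.mem_ofList _ _).mpr hcl
      rcases pvSel_cover K [] c hcK with (h | h) | (h | h)
      · simp at h
      · simp at h
      · exact List.mem_map.mpr ⟨c, h, rfl⟩
      · exact List.mem_map.mpr ⟨pvMirror c, h, pvRep_mirror (hl c hcl)⟩
    · intro hx
      obtain ⟨c, hc, rfl⟩ := List.mem_map.mp hx
      exact List.mem_map.mpr ⟨c, (PySem.Set.mem_ofList _ _).mp (hSelK c hc), rfl⟩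
  calc (Sel.map (pvH l)).sum
      = (Sel.map (pvH l ∘ pvRep)).sum := by
        refine congrArg List.sum (List.map_congr_left ?_)
        intro c hc
        exact (pvH_rep l (hSelD c hc)).symm
    _ = ((Sel.map pvRep).map (pvH l)).sum := by rw [List.map_map]
    _ = ((PySem.Set.ofList (l.map pvRep)).map (pvH l)).sum :=
        ((hperm.map (pvH l)).sum_eq).symm

-- ===== VERDICT (by name: the statement is the Claim_ definition above) =====
theorem mirrorFrequency_spec : Claim_equal_mirrorFrequency := by
  intro s hdom
  unfold Spec_mirrorFrequency
  have hl : ∀ c ∈ s.toList, pvDomChar c = true := by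
    simpa [Dom_mirrorFrequency, pvDomStr, List.all_eq_true] using hdom
  have hA : mirrorFrequency s =
      ((PySem.Dict.counter s.toList).keys.foldl (pvStepA s.toList)
        (0, PySem.Dict.empty)).1 := rfl
  rw [hA, PySem.Dict.keys_counter,
    pvA_loop s.toList (PySem.Set.ofList s.toList) [] 0 PySem.Dict.empty
      (fun c hc => hl c ((PySem.Set.mem_ofList _ _).mp hc)) (by simp)
      (by simp [PySem.Dict.contains_empty]),
    zero_add, pvMain s.toList hl, ← pvB_eq s hl]
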